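-- pv_equiv track=rewrite | github.com/GabStra/MyWorkoutAssistant | workout_generator_pkg/json_patching.py | is_path_allowed_in_scope
-- ===== SOURCE A (Python) =====
-- from typing import Any, Dict, Iterable, List, Set, Tuple
--
-- def escape_json_pointer_token(token: Any) -> str:
--     return str(token).replace("~", "~0").replace("/", "~1")
--
-- def normalize_json_pointer(path: Any) -> str:
--     if path is None or path == "":
--         return ""
--     if not isinstance(path, str):
--         path = str(path)
--     if not path.startswith("/"):
--         path = "/" + path
--     parts = path.split("/")
--     normalized_parts = []
--     for part in parts[1:]:
--         part = part.replace("~1", "/").replace("~0", "~")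
--         normalized_parts.append(escape_json_pointer_token(part))
--     return "/" + "/".join(normalized_parts)
--
-- def is_path_allowed_in_scope(path: Any, allowed_exact_paths: Set[str], allowed_descendant_paths: Set[str]) -> bool:
--     pointer = normalize_json_pointer(path)
--     if pointer in {normalize_json_pointer(p) for p in allowed_exact_paths}:
--         return True
--     for allowed in allowed_descendant_paths:
--         allowed_norm = normalize_json_pointer(allowed)
--         if pointer == allowed_norm:
--             return True
--         if allowed_norm and pointer.startswith(allowed_norm + "/"):
--             return True
--     return False
-- ===== SOURCE B (Python) =====
-- def escape_json_pointer_token(token):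
--     return str(token).replace("~", "~0").replace("/", "~1")
--
-- def normalize_json_pointer(path):
--     if path is None or path == "":
--         return ""
--     if not isinstance(path, str):
--         path = str(path)
--     if not path.startswith("/"):
--         path = "/" + path
--     parts = path.split("/")
--     normalized_parts = []
--     for part in parts[1:]:
--         part = part.replace("~1", "/").replace("~0", "~")
--         normalized_parts.append(escape_json_pointer_token(part))
--     return "/" + "/".join(normalized_parts)
--
-- def is_path_allowed_in_scope(path, allowed_exact_paths, allowed_descendant_paths):
--     pointer = normalize_json_pointer(path)
--     if pointer in {normalize_json_pointer(p) for p in allowed_exact_paths}: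
--         return True
--     descendants = {normalize_json_pointer(p) for p in allowed_descendant_paths}
--     if pointer in descendants:
--         return True
--     for i in range(1, len(pointer)):
--         if pointer[i] == "/" and pointer[:i] in descendants:
--             return True
--     return False
-- ===== Notes on version B (the rewrite author's own statement) =====
-- stated objective: alternative
-- what changed: Instead of scanning every allowed descendant path and testing pointer.startswith(allowed+'/'), B builds the normalized descendant set once and walks the pointer's characters, doing one set lookup per '/' boundary prefix of the pointer.
import Mathlib
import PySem

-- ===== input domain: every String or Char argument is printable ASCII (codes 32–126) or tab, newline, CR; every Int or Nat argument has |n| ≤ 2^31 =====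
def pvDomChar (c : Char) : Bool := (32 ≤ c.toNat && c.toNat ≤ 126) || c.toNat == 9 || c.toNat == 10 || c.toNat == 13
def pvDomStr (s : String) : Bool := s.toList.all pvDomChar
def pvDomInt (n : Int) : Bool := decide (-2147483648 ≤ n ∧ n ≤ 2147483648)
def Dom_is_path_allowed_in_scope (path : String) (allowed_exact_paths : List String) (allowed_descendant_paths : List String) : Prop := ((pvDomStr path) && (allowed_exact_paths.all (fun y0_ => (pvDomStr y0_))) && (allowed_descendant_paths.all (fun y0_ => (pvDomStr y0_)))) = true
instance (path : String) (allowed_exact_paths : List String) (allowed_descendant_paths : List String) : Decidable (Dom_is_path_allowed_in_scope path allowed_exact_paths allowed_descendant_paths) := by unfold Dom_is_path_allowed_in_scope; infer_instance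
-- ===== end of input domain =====

-- B replaces A's scan of every allowed descendant path (startswith test each) by one normalized
-- descendant set plus a walk over the pointer's '/'-boundary prefixes with set lookups (alternative decomposition).


-- ===== PORT A =====
-- shared module helpers (both Pythons carry them verbatim); ported on List Char via PySem.Chars
-- (string equality/concat is done on .toList — exact for Lean strings).
def escape_json_pointer_token (token : List Char) : List Char :=
  PySem.Chars.replace (PySem.Chars.replace token ['~'] ['~', '0']) ['/'] ['~', '1']

-- 'path is None or path == ""' and the isinstance(str) branch: path is a str here, so only path == "" applies.
def normalize_json_pointer (path : List Char) : List Char :=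
  if path = [] then []
  else
    let path := if !(PySem.Chars.startswith path ['/']) then '/' :: path else path
    let parts := PySem.Chars.splitOn path ['/']
    let normalized_parts :=
      (PySem.List.slice parts (some 1) none).map
        (fun part => escape_json_pointer_token
          (PySem.Chars.replace (PySem.Chars.replace part ['~', '1'] ['/']) ['~', '0'] ['~']))
    '/' :: PySem.Chars.join ['/'] normalized_parts

-- 'for allowed in allowed_descendant_paths: … return True / fall through'
def pvLoopA (pointer : List Char) : List String → Bool
  | [] => false
  | allowed :: rest =>
    let allowed_norm := normalize_json_pointer allowed.toList
    if pointer = allowed_norm then true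
    else if allowed_norm ≠ [] ∧ PySem.Chars.startswith pointer (allowed_norm ++ ['/']) then true
    else pvLoopA pointer rest

def is_path_allowed_in_scope (path : String) (allowed_exact_paths : List String) (allowed_descendant_paths : List String) : Bool :=
  let pointer := normalize_json_pointer path.toList
  if pointer ∈ PySem.Set.ofList (allowed_exact_paths.map (fun p => normalize_json_pointer p.toList)) then true
  else pvLoopA pointer allowed_descendant_paths

-- ===== PORT B =====
-- 'for i in range(1, len(pointer)): if pointer[i] == "/" and pointer[:i] in descendants: return True'
def pvLoopB (pointer : List Char) (descendants : PySem.Set (List Char)) : List Int → Bool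
  | [] => false
  | i :: rest =>
    if PySem.List.pyGet? pointer i = some '/' ∧ PySem.List.slice pointer none (some i) ∈ descendants then true
    else pvLoopB pointer descendants rest

def is_path_allowed_in_scope_alt (path : String) (allowed_exact_paths : List String) (allowed_descendant_paths : List String) : Bool :=
  let pointer := normalize_json_pointer path.toList
  if pointer ∈ PySem.Set.ofList (allowed_exact_paths.map (fun p => normalize_json_pointer p.toList)) then true
  else
    let descendants := PySem.Set.ofList (allowed_descendant_paths.map (fun p => normalize_json_pointer p.toList))
    if pointer ∈ descendants then true
    else pvLoopB pointer descendants (PySem.List.pyRange 1 (pointer.length : Int) 1)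

-- ===== PRECONDITION & SPEC =====
def Spec_is_path_allowed_in_scope (path : String) (allowed_exact_paths : List String) (allowed_descendant_paths : List String) (out : Bool) : Prop := out = is_path_allowed_in_scope_alt path allowed_exact_paths allowed_descendant_paths
instance (path : String) (allowed_exact_paths : List String) (allowed_descendant_paths : List String) (out : Bool) : Decidable (Spec_is_path_allowed_in_scope path allowed_exact_paths allowed_descendant_paths out) := by unfold Spec_is_path_allowed_in_scope; infer_instance

-- ===== CLAIM (what is proved, stated in full; the proofs are below) =====
def Claim_equal_is_path_allowed_in_scope : Prop := ∀ (path : String) (allowed_exact_paths : List String) (allowed_descendant_paths : List String), Dom_is_path_allowed_in_scope path allowed_exact_paths allowed_descendant_paths → Spec_is_path_allowed_in_scope path allowed_exact_paths allowed_descendant_paths (is_path_allowed_in_scope path allowed_exact_paths allowed_descendant_paths)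

-- ===== LEMMAS AND PROOFS =====

theorem pvLoopA_eq_true_iff (pointer : List Char) (l : List String) :
    pvLoopA pointer l = true ↔
      ∃ a ∈ l, pointer = normalize_json_pointer a.toList ∨
        (normalize_json_pointer a.toList ≠ [] ∧
          (normalize_json_pointer a.toList ++ ['/']) <+: pointer) := by
  induction l with
  | nil => simp [pvLoopA]
  | cons a rest ih =>
    simp only [pvLoopA]
    split_ifs with h1 h2
    · simp only [true_iff]
      exact ⟨a, List.mem_cons_self .., Or.inl h1⟩
    · simp only [true_iff]
      exact ⟨a, List.mem_cons_self .., Or.inr ⟨h2.1, (PySem.Chars.startswith_iff ..).mp h2.2⟩⟩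
    · rw [ih]
      constructor
      · rintro ⟨x, hx, hc⟩; exact ⟨x, List.mem_cons_of_mem _ hx, hc⟩
      · rintro ⟨x, hx, hc⟩
        rcases List.mem_cons.mp hx with rfl | hx'
        · rcases hc with hc | hc
          · exact absurd hc h1
          · exact absurd ⟨hc.1, (PySem.Chars.startswith_iff ..).mpr hc.2⟩ h2
        · exact ⟨x, hx', hc⟩

theorem pvLoopB_eq_true_iff (pointer : List Char) (d : PySem.Set (List Char)) (idxs : List Int) :
    pvLoopB pointer d idxs = true ↔
      ∃ i ∈ idxs, PySem.List.pyGet? pointer i = some '/' ∧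
        PySem.List.slice pointer none (some i) ∈ d := by
  induction idxs with
  | nil => simp [pvLoopB]
  | cons i rest ih =>
    simp only [pvLoopB]
    split_ifs with h
    · simp only [true_iff]
      exact ⟨i, List.mem_cons_self .., h⟩
    · rw [ih]
      constructor
      · rintro ⟨j, hj, hc⟩; exact ⟨j, List.mem_cons_of_mem _ hj, hc⟩
      · rintro ⟨j, hj, hc⟩
        rcases List.mem_cons.mp hj with rfl | hj'
        · exact absurd hc h
        · exact ⟨j, hj', hc⟩

-- key boundary lemma: a nonempty n followed by '/' prefixes ptr iff n is the take of a '/'-position of ptr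
theorem prefix_slash_iff (n ptr : List Char) :
    (n ≠ [] ∧ (n ++ ['/']) <+: ptr) ↔
      ∃ i : Nat, 1 ≤ i ∧ i < ptr.length ∧ ptr[i]? = some '/' ∧ n = ptr.take i := by
  constructor
  · rintro ⟨hne, t, ht⟩
    subst ht
    refine ⟨n.length, ?_, ?_, ?_, ?_⟩
    · have := List.length_pos_iff.mpr hne; omega
    · simp
    · rw [List.append_assoc, List.getElem?_append_right (le_refl _)]
      simp
    · rw [List.append_assoc]
      exact (List.take_left ..).symm
  · rintro ⟨i, h1, h2, h3, rfl⟩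
    have hg : ptr[i] = '/' := by
      rw [List.getElem?_eq_getElem h2] at h3
      exact Option.some.inj h3
    refine ⟨?_, ptr.drop (i + 1), ?_⟩
    · intro h
      have : (ptr.take i).length = 0 := by rw [h]; simp
      simp only [List.length_take] at this
      omega
    · calc ptr.take i ++ ['/'] ++ ptr.drop (i + 1)
          = ptr.take i ++ ('/' :: ptr.drop (i + 1)) := by simp
        _ = ptr.take i ++ (ptr[i] :: ptr.drop (i + 1)) := by rw [hg]
        _ = ptr.take i ++ ptr.drop i := by rw [List.getElem_cons_drop]
        _ = ptr := List.take_append_drop ..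

-- ===== VERDICT (by name: the statement is the Claim_ definition above) =====
theorem is_path_allowed_in_scope_spec : Claim_equal_is_path_allowed_in_scope := by
  intro path ae ad _
  unfold Spec_is_path_allowed_in_scope is_path_allowed_in_scope is_path_allowed_in_scope_alt
  set pointer := normalize_json_pointer path.toList with hp
  by_cases hx : pointer ∈ PySem.Set.ofList (ae.map (fun p => normalize_json_pointer p.toList))
  · simp [hx]
  · simp only [hx, if_false]
    have hmem : ∀ x : List Char,
        (x ∈ PySem.Set.ofList (ad.map fun p => normalize_json_pointer p.toList)) ↔
          ∃ a ∈ ad, normalize_json_pointer a.toList = x := by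
      intro x; rw [PySem.Set.mem_ofList, List.mem_map]
    rw [Bool.eq_iff_iff, pvLoopA_eq_true_iff]
    constructor
    · rintro ⟨a, ha, hc | hc⟩
      · rw [if_pos ((hmem _).mpr ⟨a, ha, hc.symm⟩)]
      · rcases (prefix_slash_iff _ _).mp hc with ⟨i, h1, h2, h3, h4⟩
        split_ifs with hm
        · rfl
        · rw [pvLoopB_eq_true_iff]
          refine ⟨(i : Int), ?_, ?_, ?_⟩
          · rw [PySem.List.mem_pyRange_one]
            constructor
            · exact_mod_cast h1
            · exact_mod_cast h2
          · rw [PySem.List.pyGet?_natCast]; exact h3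
          · rw [PySem.List.slice_to_natCast]
            exact (hmem _).mpr ⟨a, ha, h4⟩
    · intro h
      split_ifs at h with hm
      · rcases (hmem _).mp hm with ⟨a, ha, hA⟩
        exact ⟨a, ha, Or.inl hA.symm⟩
      · rw [pvLoopB_eq_true_iff] at h
        rcases h with ⟨i, hi, hg, hs⟩
        rw [PySem.List.mem_pyRange_one] at hi
        obtain ⟨j, rfl⟩ : ∃ j : Nat, (j : Int) = i := ⟨i.toNat, Int.toNat_of_nonneg (by omega)⟩
        rw [PySem.List.pyGet?_natCast] at hg
        rw [PySem.List.slice_to_natCast] at hs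
        rcases (hmem _).mp hs with ⟨a, ha, hA⟩
        refine ⟨a, ha, Or.inr ((prefix_slash_iff _ _).mpr ⟨j, ?_, ?_, hg, hA⟩)⟩
        · exact_mod_cast hi.1
        · exact_mod_cast hi.2
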